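-- pv_equiv track=rewrite | github.com/iou76928-eng/ziwei-web | ziwei_core.py | build_daxian_ming_row
-- ===== SOURCE A (Python) =====
-- PALACE_ORDER_CANONICAL = ["命","兄","夫","子","財","疾","遷","僕","官","田","福","父"]
--
-- def build_daxian_ming_row(cols: list, data: dict, anchor_col: str) -> list:
--     """anchor_col 標命，右側依 PALACE_ORDER_CANONICAL 循環。"""
--     if not anchor_col or anchor_col not in cols:
--         return [""] * len(cols)
--     labels = PALACE_ORDER_CANONICAL
--     out = [""] * len(cols)
--     start_idx = cols.index(anchor_col)
--     for offset in range(len(cols)):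
--         pos = (start_idx + offset) % len(cols)
--         out[pos] = labels[offset % len(labels)]
--     return out
-- ===== SOURCE B (Python) =====
-- PALACE_ORDER_CANONICAL = ["命","兄","夫","子","財","疾","遷","僕","官","田","福","父"]
--
-- def build_daxian_ming_row(cols: list, data: dict, anchor_col: str) -> list:
--     if not anchor_col or anchor_col not in cols:
--         return [""] * len(cols)
--     n = len(cols)
--     full = (PALACE_ORDER_CANONICAL * (n // 12 + 1))[:n]
--     k = n - cols.index(anchor_col)
--     return full[k:] + full[:k]
-- ===== Notes on version B (the rewrite author's own statement) =====
-- stated objective: simpler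
-- what changed: Replaces A's per-offset modular index-write loop into a preallocated output by tiling the 12 canonical labels to length n and returning a single slice-based right rotation aligned to the anchor column.
import Mathlib
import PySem

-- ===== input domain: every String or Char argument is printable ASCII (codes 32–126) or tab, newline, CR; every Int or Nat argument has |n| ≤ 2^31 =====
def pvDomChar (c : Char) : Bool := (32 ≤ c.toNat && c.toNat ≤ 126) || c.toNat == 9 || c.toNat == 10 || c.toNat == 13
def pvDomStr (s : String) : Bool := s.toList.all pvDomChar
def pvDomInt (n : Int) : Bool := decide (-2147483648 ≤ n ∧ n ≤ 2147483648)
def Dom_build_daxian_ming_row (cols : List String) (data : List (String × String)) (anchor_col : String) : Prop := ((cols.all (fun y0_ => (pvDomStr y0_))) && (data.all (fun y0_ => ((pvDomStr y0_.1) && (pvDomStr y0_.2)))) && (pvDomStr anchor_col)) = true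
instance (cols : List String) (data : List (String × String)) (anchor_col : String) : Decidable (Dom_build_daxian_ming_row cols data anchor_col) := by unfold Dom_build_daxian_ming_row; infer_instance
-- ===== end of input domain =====

-- B replaces A's per-offset modular index writes by one slice-based cyclic rotation of a tiled label table (objective: simpler; same O(n) cost).

def pvPalace : List String := ["命","兄","夫","子","財","疾","遷","僕","官","田","福","父"]

-- ===== PORT A =====
-- out[pos] = labels[offset % 12]: pos = (start_idx+offset) % len(cols) is nonneg (positive divisor), so .toNat is exact;
-- labels[offset % 12] is always in range, ported as getD with the index's .toNat.
def build_daxian_ming_row (cols : List String) (data : List (String × String)) (anchor_col : String) : List String :=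
  if anchor_col = "" ∨ ¬ cols.contains anchor_col then
    List.replicate cols.length ""
  else
    let start_idx : Nat := (PySem.List.index? cols anchor_col).getD 0
    (PySem.List.pyRange 0 (cols.length : Int) 1).foldl
      (fun out offset =>
        out.set (PySem.Int.mod ((start_idx : Int) + offset) (cols.length : Int)).toNat
          (pvPalace.getD (PySem.Int.mod offset 12).toNat ""))
      (List.replicate cols.length "")

-- ===== PORT B =====
-- PALACE_ORDER_CANONICAL * (n//12+1) is flatten∘replicate; [:n] is take; full[k:]+full[:k] via PySem.List.slice.
def build_daxian_ming_row_alt (cols : List String) (data : List (String × String)) (anchor_col : String) : List String :=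
  if anchor_col = "" ∨ ¬ cols.contains anchor_col then
    List.replicate cols.length ""
  else
    let n := cols.length
    let full := (List.replicate (n / 12 + 1) pvPalace).flatten.take n
    let k := n - (PySem.List.index? cols anchor_col).getD 0
    PySem.List.slice full (some (k : Int)) none ++ PySem.List.slice full none (some (k : Int))

-- ===== PRECONDITION & SPEC =====
def Spec_build_daxian_ming_row (cols : List String) (data : List (String × String)) (anchor_col : String) (out : List String) : Prop := out = build_daxian_ming_row_alt cols data anchor_col
instance (cols : List String) (data : List (String × String)) (anchor_col : String) (out : List String) : Decidable (Spec_build_daxian_ming_row cols data anchor_col out) := by unfold Spec_build_daxian_ming_row; infer_instance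

-- ===== CLAIM (what is proved, stated in full; the proofs are below) =====
def Claim_equal_build_daxian_ming_row : Prop := ∀ (cols : List String) (data : List (String × String)) (anchor_col : String), Dom_build_daxian_ming_row cols data anchor_col → Spec_build_daxian_ming_row cols data anchor_col (build_daxian_ming_row cols data anchor_col)

-- ===== LEMMAS AND PROOFS =====

-- A's loop, restricted to the first m offsets, on Nat offsets.
def pvLoopA (n s m : Nat) : List String :=
  (List.range m).foldl
    (fun out o => out.set ((s + o) % n) (pvPalace.getD (o % 12) ""))
    (List.replicate n "")

lemma pvLoopA_length (n s m : Nat) : (pvLoopA n s m).length = n := by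
  induction m with
  | zero => simp [pvLoopA]
  | succ m ih =>
      simp only [pvLoopA, List.range_succ, List.foldl_append, List.foldl_cons, List.foldl_nil]
      simpa [pvLoopA] using ih

lemma pvLoopA_get (n s : Nat) (hs : s < n) :
    ∀ m, m ≤ n → ∀ i, i < n →
      (pvLoopA n s m)[i]? =
        some (if (i + n - s) % n < m then pvPalace.getD (((i + n - s) % n) % 12) "" else "") := by
  intro m
  induction m with
  | zero => intro _ i hi; simp [pvLoopA, hi]
  | succ m ih =>
      intro hm i hi
      have hm' : m ≤ n := Nat.le_of_succ_le hm
      have key : ((s + m) % n + n - s) % n = m := by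
        have h1 : (s + m) % n + n - s = (s + m) % n + (n - s) := by omega
        rw [h1, Nat.mod_add_mod]
        have : s + m + (n - s) = m + n := by omega
        rw [this, Nat.add_mod_right, Nat.mod_eq_of_lt (by omega)]
      have hstep : pvLoopA n s (m + 1) =
          (pvLoopA n s m).set ((s + m) % n) (pvPalace.getD (m % 12) "") := by
        simp [pvLoopA, List.range_succ]
      rw [hstep]
      by_cases hpos : i = (s + m) % n
      · subst hpos
        rw [List.getElem?_set_self (by rw [pvLoopA_length]; exact hi)]
        rw [key]
        simp
      · rw [List.getElem?_set_ne (fun h => hpos h.symm)]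
        rw [ih hm' i hi]
        have hne : (i + n - s) % n ≠ m := by
          have hinv : (s + (i + n - s) % n) % n = i := by
            rw [Nat.add_mod_mod]
            have he : s + (i + n - s) = i + n := by omega
            rw [he, Nat.add_mod_right, Nat.mod_eq_of_lt hi]
          intro h
          exact hpos (by rw [← hinv, h])
        have : ((i + n - s) % n < m + 1) ↔ ((i + n - s) % n < m) := by omega
        rw [if_congr this rfl rfl]

-- full[j] = labels[j % 12]
lemma pvFlat_get (r j : Nat) (hj : j < 12 * r) :
    ((List.replicate r pvPalace).flatten)[j]? = some (pvPalace.getD (j % 12) "") := by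
  induction r generalizing j with
  | zero => omega
  | succ r ih =>
      have : (List.replicate (r + 1) pvPalace).flatten = pvPalace ++ (List.replicate r pvPalace).flatten := by
        simp [List.replicate_succ]
      rw [this]
      by_cases h12 : j < 12
      · rw [List.getElem?_append_left (by simpa [pvPalace] using h12)]
        rw [Nat.mod_eq_of_lt h12]
        interval_cases j <;> rfl
      · have hlen : pvPalace.length = 12 := by rfl
        rw [List.getElem?_append_right (by simp only [hlen]; omega)]
        rw [hlen]
        have := ih (j - 12) (by omega)
        have hmod : (j - 12) % 12 = j % 12 := by omega
        rw [this, hmod]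

-- both sides, elementwise at i < n, in the non-trivial branch
lemma pv_main (cols : List String) (data : List (String × String)) (anchor_col : String)
    (s : Nat) (hidx : PySem.List.index? cols anchor_col = some s)
    (hg : ¬ (anchor_col = "" ∨ ¬ cols.contains anchor_col)) :
    build_daxian_ming_row cols data anchor_col = build_daxian_ming_row_alt cols data anchor_col := by
  obtain ⟨hsn, -, -⟩ := PySem.List.getElem_of_index?_eq_some hidx
  set n := cols.length with hn
  have hApy : build_daxian_ming_row cols data anchor_col = pvLoopA n s n := by
    unfold build_daxian_ming_row
    rw [if_neg hg]
    simp only [hidx, Option.getD_some, PySem.List.pyRange_zero_natCast, List.foldl_map, ← hn]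
    unfold pvLoopA
    congr 1
    funext out o
    have h1 : (PySem.Int.mod ((s : Int) + (o : Int)) (n : Int)).toNat = (s + o) % n := by
      have : ((s : Int) + (o : Int)) = ((s + o : Nat) : Int) := by push_cast; ring
      rw [this, PySem.Int.mod_natCast, Int.toNat_natCast]
    have h2 : (PySem.Int.mod (o : Int) 12).toNat = o % 12 := by
      have : (12 : Int) = ((12 : Nat) : Int) := by norm_cast
      rw [this, PySem.Int.mod_natCast, Int.toNat_natCast]
    rw [h1, h2]
  have hflatlen : ((List.replicate (n / 12 + 1) pvPalace).flatten).length = (n / 12 + 1) * 12 := by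
    simp [pvPalace, Nat.mul_comm]
  have hnlt : n < (n / 12 + 1) * 12 := by omega
  have hfulllen : ((List.replicate (n / 12 + 1) pvPalace).flatten.take n).length = n := by
    rw [List.length_take, hflatlen]; omega
  have hBpy : build_daxian_ming_row_alt cols data anchor_col =
      ((List.replicate (n / 12 + 1) pvPalace).flatten.take n).drop (n - s) ++
      ((List.replicate (n / 12 + 1) pvPalace).flatten.take n).take (n - s) := by
    unfold build_daxian_ming_row_alt
    rw [if_neg hg]
    simp only [hidx, Option.getD_some, ← hn]
    rw [PySem.List.slice_from_natCast, PySem.List.slice_to_natCast]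
  rw [hApy, hBpy]
  set full := (List.replicate (n / 12 + 1) pvPalace).flatten.take n with hfull
  have hfullget : ∀ j, j < n → full[j]? = some (pvPalace.getD (j % 12) "") := by
    intro j hj
    rw [hfull, List.getElem?_take_of_lt hj]
    exact pvFlat_get _ j (by omega)
  apply List.ext_getElem?
  intro i
  by_cases hi : i < n
  · rw [pvLoopA_get n s hsn n (le_refl n) i hi]
    have hmodlt : (i + n - s) % n < n := Nat.mod_lt _ (by omega)
    rw [if_pos hmodlt]
    have hdroplen : (full.drop (n - s)).length = s := by
      rw [List.length_drop, hfulllen]; omega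
    by_cases his : i < s
    · rw [List.getElem?_append_left (by rw [hdroplen]; exact his)]
      rw [List.getElem?_drop]
      rw [hfullget (n - s + i) (by omega)]
      have : (i + n - s) % n = n - s + i := by
        rw [Nat.mod_eq_of_lt (by omega)]; omega
      rw [this]
    · rw [List.getElem?_append_right (by rw [hdroplen]; omega)]
      rw [hdroplen]
      rw [List.getElem?_take_of_lt (by omega : i - s < n - s)]
      rw [hfullget (i - s) (by omega)]
      have : (i + n - s) % n = i - s := by
        have he : i + n - s = (i - s) + n := by omega
        rw [he, Nat.add_mod_right, Nat.mod_eq_of_lt (by omega)]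
      rw [this]
  · rw [List.getElem?_eq_none (by rw [pvLoopA_length]; omega)]
    rw [List.getElem?_eq_none]
    simp only [List.length_append, List.length_drop, List.length_take, hfulllen]
    omega

-- ===== VERDICT (by name: the statement is the Claim_ definition above) =====
theorem build_daxian_ming_row_spec : Claim_equal_build_daxian_ming_row := by
  intro cols data anchor_col _
  unfold Spec_build_daxian_ming_row
  by_cases hg : anchor_col = "" ∨ ¬ cols.contains anchor_col
  · unfold build_daxian_ming_row build_daxian_ming_row_alt
    rw [if_pos hg, if_pos hg]
  · have hmem : anchor_col ∈ cols := by
      rcases not_or.mp hg with ⟨-, h2⟩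
      simpa using not_not.mp h2
    obtain ⟨s, hidx⟩ := Option.isSome_iff_exists.mp
      ((PySem.List.index?_isSome_iff cols anchor_col).mpr hmem)
    exact pv_main cols data anchor_col s hidx hg
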